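/- GENERATED by farm/mkstatement.py from design/units.tsv (unit `decode_residue.7c`) and the assertions of Vorbis/Spec/DecodeResidue7.lean — do not edit.
   THE STATEMENT of the proof unit `decode_residue.7c`: segment 7c of `decode_residue` (34 instructions; entries 0x10f40d;
   exits 0x10f692,0x10fb14; ranges 0x10f40d-0x10f4a3)
   takes each of its entry assertions to one of its exit assertions (`Vorbis.Spec.DecodeResidue.Seg7c`), given the contracts of its callees.
   What the names mean: Vorbis/Spec/Basic.lean (the shared hypotheses), Vorbis/Spec/DecodeResidue7.lean (the assertions). The theorem to prove:
   `theorem decode_residue_7c_ok : Vorbis.Spec.decode_residue_7c.Statement`. -/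
import Vorbis.Spec.DecodeResidue7
namespace Vorbis.Spec.decode_residue_7c
open X86 X86.User Asan

/-- The statement of unit `decode_residue.7c`. -/
def Statement : Prop :=
  ∀ (Lay : Layout) (_hLay : Lay.hi = 0x1000000) (μ : Microarch) (_hμ : UserX.MicroOK μ) (u₀ : State)
    (_hcode : HasCodeNat Lay u₀ Vorbis.L.decode_residue.entry Vorbis.Code.code_decode_residue.nat Vorbis.L.decode_residue.size)
    (_h_asan_load8_noabort : Asan.SmallCheck Lay μ Vorbis.WayInv (Vorbis.CodeOK u₀) [.rax, .rcx, .rdx] 8 Vorbis.L.__asan_load8_noabort.entry)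
    (_h_asan_load1_noabort : Asan.SmallCheck Lay μ Vorbis.WayInv (Vorbis.CodeOK u₀) [.rax, .rdx] 1 Vorbis.L.__asan_load1_noabort.entry)
    (_h_asan_load4_noabort : Asan.SmallCheck Lay μ Vorbis.WayInv (Vorbis.CodeOK u₀) [.rax, .rcx, .rdx] 4 Vorbis.L.__asan_load4_noabort.entry)
    (_h_asan_store8_noabort : Asan.SmallCheck Lay μ Vorbis.WayInv (Vorbis.CodeOK u₀) [.rax, .rcx, .rdx] 8 Vorbis.L.__asan_store8_noabort.entry),
    Vorbis.Spec.DecodeResidue.Seg7c Lay μ u₀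

end Vorbis.Spec.decode_residue_7c
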